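-- pv_equiv track=rewrite | github.com/joshrule/ec | bin/autofeatures.py | shares_order
-- ===== SOURCE A (Python) =====
-- from itertools import permutations
--
-- def shared(xs, ys):
--     ixs = xs[:]
--     iys = ys[:]
--     zs = []
--     for x in ixs:
--         if x in iys:
--             zs.append(x)
--             iys.remove(x)
--     return zs
--
-- def shares_order(xs, ys):
--     shared_elements = shared(xs, ys)
--     if shared_elements == []:
--         return False
--     ps = permutations(shared_elements)
--     if len(xs) < len(ys):
--         short_list = xs
--         long_list = ys
--     else:
--         short_list = ys
--         long_list = xs
--     return any(match_order(p, short_list) and match_order(p, long_list) for p in ps)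
--
-- def match_order(query, xs):
--     ix = 0
--     iq = 0
--     while True:
--         if iq == len(query):
--             return True
--         elif ix == len(xs):
--             return False
--         elif query[iq] == xs[ix]:
--             iq += 1
--             ix += 1
--         else:
--             ix += 1
-- ===== SOURCE B (Python) =====
-- def shares_order(xs, ys):
--     # number of shared elements (with multiplicity)
--     k = sum(min(xs.count(v), ys.count(v)) for v in set(xs))
--     if k == 0:
--         return False
--     # longest-common-subsequence length by row DP
--     prev = [0] * (len(ys) + 1)
--     for x in xs:
--         cur = [0]
--         for j, y in enumerate(ys):
--             cur.append(prev[j] + 1 if x == y else max(prev[j + 1], cur[j]))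
--         prev = cur
--     return prev[-1] == k
-- ===== Notes on version B (the rewrite author's own statement) =====
-- stated objective: alternative
-- what changed: Replaces the enumeration of all permutations of the shared multiset (each checked as a subsequence of both lists) with a longest-common-subsequence row DP: some permutation of the shared elements is a common subsequence iff the LCS length equals the number of shared elements.
import Mathlib
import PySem

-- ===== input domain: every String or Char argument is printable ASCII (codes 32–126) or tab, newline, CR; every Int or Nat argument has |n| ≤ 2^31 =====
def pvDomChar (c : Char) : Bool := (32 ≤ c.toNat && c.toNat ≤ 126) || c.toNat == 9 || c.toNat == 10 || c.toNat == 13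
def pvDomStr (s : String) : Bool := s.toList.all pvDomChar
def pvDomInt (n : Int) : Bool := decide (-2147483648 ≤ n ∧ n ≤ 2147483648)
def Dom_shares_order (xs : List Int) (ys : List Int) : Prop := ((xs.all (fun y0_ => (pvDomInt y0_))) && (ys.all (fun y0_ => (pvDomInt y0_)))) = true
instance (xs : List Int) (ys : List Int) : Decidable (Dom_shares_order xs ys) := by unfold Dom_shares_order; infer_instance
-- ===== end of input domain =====

-- B replaces A's scan over all permutations of the shared multiset by a
-- longest-common-subsequence row DP (some permutation of the shared elements is a
-- subsequence of both lists iff the LCS length equals the shared-element count).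

-- ===== PORT A =====
-- helper `shared`: for x in xs: if x in iys: zs.append(x); iys.remove(x)
-- (list.remove under the membership guard is first-occurrence erase: PySem.List.remove?_eq_some_erase)
def sharedAux : List Int → List Int → List Int
  | [], _ => []
  | x :: rest, iys =>
      if x ∈ iys then x :: sharedAux rest (iys.erase x)
      else sharedAux rest iys

-- helper `match_order`: the two-index while loop, transliterated on the list suffixes
def matchOrder : List Int → List Int → Bool
  | [], _ => true
  | _ :: _, [] => false
  | q :: qs, x :: xt => if q = x then matchOrder qs xt else matchOrder (q :: qs) xt
termination_by q l => q.length + l.length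
decreasing_by all_goals (simp only [List.length_cons]; omega)

def shares_order (xs : List Int) (ys : List Int) : Bool :=
  let shared_elements := sharedAux xs ys
  if shared_elements = [] then false
  else
    let ps := PySem.List.permutations shared_elements shared_elements.length
    let short_list := if xs.length < ys.length then xs else ys
    let long_list := if xs.length < ys.length then ys else xs
    ps.any (fun p => matchOrder p short_list && matchOrder p long_list)

-- ===== PORT B =====
-- k = sum(min(xs.count(v), ys.count(v)) for v in set(xs))  (a sum over a set: order-independent)
def sharedCount (xs : List Int) (ys : List Int) : Nat :=
  ((PySem.Set.ofList xs).map
    (fun v => min (PySem.List.count xs v) (PySem.List.count ys v))).sum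

-- inner DP loop: c is the running cell cur[j], the list argument carries prev[j], prev[j+1], …
def lcsStepAux (x : Int) : List Int → List Nat → Nat → List Nat
  | y :: ys', p0 :: p1 :: ps, c =>
      c :: lcsStepAux x ys' (p1 :: ps) (if x = y then p0 + 1 else max p1 c)
  | _, _, c => [c]

def shares_order_alt (xs : List Int) (ys : List Int) : Bool :=
  let k := sharedCount xs ys
  if k = 0 then false
  else
    let row := xs.foldl (fun prev x => lcsStepAux x ys prev 0)
                (List.replicate (ys.length + 1) 0)
    row.getLastD 0 == k

-- ===== PRECONDITION & SPEC =====
def Spec_shares_order (xs : List Int) (ys : List Int) (out : Bool) : Prop := out = shares_order_alt xs ys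
instance (xs : List Int) (ys : List Int) (out : Bool) : Decidable (Spec_shares_order xs ys out) := by unfold Spec_shares_order; infer_instance

-- ===== CLAIM (what is proved, stated in full; the proofs are below) =====
def Claim_equal_shares_order : Prop := ∀ (xs : List Int) (ys : List Int), Dom_shares_order xs ys → Spec_shares_order xs ys (shares_order xs ys)

-- ===== LEMMAS AND PROOFS =====

-- A's greedy two-pointer match decides the sublist (subsequence) relation.
theorem matchOrder_iff (q l : List Int) : matchOrder q l = true ↔ q.Sublist l := by
  fun_induction matchOrder q l with
  | case1 l => simp [List.nil_sublist]
  | case2 q qs => simp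
  | case3 qs x xt ih => rw [ih]; exact (List.cons_sublist_cons).symm
  | case4 q qs x xt h ih =>
      rw [ih]
      constructor
      · exact fun hs => hs.cons x
      · intro hs
        rcases List.sublist_cons_iff.mp hs with hs | ⟨r, hr, _⟩
        · exact hs
        · exact absurd hr (by simp [List.cons.injEq, h])

-- itertools.permutations (full length) contains every permutation of its input.
theorem perm_succ (xs : List Int) (r : Nat) :
    PySem.List.permutations xs (r + 1) =
      (List.range xs.length).flatMap
        (fun i =>
          match xs[i]? with
          | none => []
          | some x => (PySem.List.permutations (xs.eraseIdx i) r).map (x :: ·)) := by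
  rw [PySem.List.permutations]
  congr 1
  funext i
  cases xs[i]? <;> rfl

theorem mem_permutations_of_perm :
    ∀ (n : Nat) (xs p : List Int), xs.length = n → p.Perm xs →
      p ∈ PySem.List.permutations xs n := by
  intro n
  induction n with
  | zero =>
      intro xs p hl hp
      have hx : xs = [] := List.length_eq_zero_iff.mp hl
      subst hx
      rw [List.perm_nil.mp hp, PySem.List.permutations_zero]
      exact List.mem_singleton.mpr rfl
  | succ n ih =>
      intro xs p hl hp
      match p, hp with
      | [], hp => simp [← hp.length_eq] at hl
      | h :: t, hp =>
        have hmem : h ∈ xs := hp.mem_iff.mp (List.mem_cons_self)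
        obtain ⟨i, hi, hx⟩ := List.getElem_of_mem hmem
        have hxs : xs = xs.take i ++ h :: xs.drop (i + 1) := by
          conv_lhs => rw [← List.take_append_drop i xs]
          rw [List.drop_eq_getElem_cons hi, hx]
        have herase : xs.eraseIdx i = xs.take i ++ xs.drop (i + 1) :=
          List.eraseIdx_eq_take_drop_succ xs i
        have hperm2 : xs.Perm (h :: xs.eraseIdx i) := by
          rw [herase]
          conv_lhs => rw [hxs]
          exact List.perm_middle
        have ht : t.Perm (xs.eraseIdx i) := (hp.trans hperm2).cons_inv
        have hlen : (xs.eraseIdx i).length = n := by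
          rw [List.length_eraseIdx_of_lt hi]; omega
        have hmem' : t ∈ PySem.List.permutations (xs.eraseIdx i) n := ih _ _ hlen ht
        rw [perm_succ]
        refine List.mem_flatMap.mpr ⟨i, List.mem_range.mpr hi, ?_⟩
        simp only [List.getElem?_eq_getElem hi, hx]
        exact List.mem_map.mpr ⟨t, hmem', rfl⟩

theorem perm_of_mem_permutations_full {xs p : List Int}
    (h : p ∈ PySem.List.permutations xs xs.length) : p.Perm xs := by
  obtain ⟨hlen, rest, hperm⟩ := PySem.List.exists_perm_of_mem_permutations _ _ _ h
  have hrest : rest = [] := by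
    have := hperm.length_eq
    simp only [List.length_append, hlen] at this
    exact List.length_eq_zero_iff.mp (by omega)
  simpa [hrest] using hperm

-- A's `shared` counts each value min(count in xs, count in iys) times.
theorem count_sharedAux (v : Int) :
    ∀ (xs iys : List Int),
      (sharedAux xs iys).count v = min (xs.count v) (iys.count v) := by
  intro xs
  induction xs with
  | nil => intro iys; simp [sharedAux]
  | cons x rest ih =>
      intro iys
      by_cases hm : x ∈ iys
      · have hpos : 1 ≤ iys.count x := List.count_pos_iff.mpr hm
        simp only [sharedAux, if_pos hm, List.count_cons, ih]
        have hce : (iys.erase x).count v = iys.count v - if (x == v) then 1 else 0 :=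
          List.count_erase
        by_cases hv : x = v
        · subst hv; simp only [hce]; simp; omega
        · have hbe : (x == v) = false := by simp [hv]
          rw [hce, hbe]
          simp
      · have hz : iys.count x = 0 := List.count_eq_zero.mpr hm
        simp only [sharedAux, if_neg hm, ih, List.count_cons]
        by_cases hv : x = v
        · subst hv; simp [hz]
        · simp [hv]

-- the length of A's shared list is B's k
theorem toFinset_ofList (xs : List Int) :
    (PySem.Set.ofList xs).toFinset = xs.toFinset := by
  ext v
  simp [List.mem_toFinset, PySem.Set.mem_ofList]

theorem sharedCount_eq_sum (xs ys : List Int) :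
    sharedCount xs ys = ∑ v ∈ xs.toFinset, min (xs.count v) (ys.count v) := by
  unfold sharedCount
  rw [← toFinset_ofList xs,
    List.sum_toFinset _ (PySem.Set.nodup_ofList xs)]
  simp [PySem.List.count_eq]

theorem length_eq_sum_count_toFinset (l : List Int) :
    l.length = ∑ v ∈ l.toFinset, l.count v := by
  simp

theorem length_sharedAux (xs ys : List Int) :
    (sharedAux xs ys).length = sharedCount xs ys := by
  rw [sharedCount_eq_sum, length_eq_sum_count_toFinset]
  have hsub : (sharedAux xs ys).toFinset ⊆ xs.toFinset := by
    intro v hv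
    rw [List.mem_toFinset] at *
    have hc := (List.count_pos_iff.mpr hv)
    rw [count_sharedAux] at hc
    exact List.count_pos_iff.mp (by omega)
  rw [Finset.sum_subset hsub]
  · exact Finset.sum_congr rfl (fun v _ => count_sharedAux v xs ys)
  · intro v _ hv
    exact List.count_eq_zero.mpr (fun hc => hv (List.mem_toFinset.mpr hc))

-- bound: any common subsequence has length ≤ B's k …
theorem length_le_sharedCount {s xs ys : List Int}
    (hx : s.Sublist xs) (hy : s.Sublist ys) :
    s.length ≤ sharedCount xs ys := by
  rw [sharedCount_eq_sum, length_eq_sum_count_toFinset]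
  have hsub : s.toFinset ⊆ xs.toFinset := by
    intro v hv; rw [List.mem_toFinset] at *; exact hx.subset hv
  have h1 : ∑ v ∈ s.toFinset, s.count v = ∑ v ∈ xs.toFinset, s.count v := by
    refine Finset.sum_subset hsub ?_
    intro v _ hv
    exact List.count_eq_zero.mpr (fun hc => hv (List.mem_toFinset.mpr hc))
  rw [h1]
  exact Finset.sum_le_sum (fun v _ => le_min (hx.count_le v) (hy.count_le v))

-- … and one of maximal length k is a permutation of A's shared list.
theorem perm_shared_of_length_eq {s xs ys : List Int}
    (hx : s.Sublist xs) (hy : s.Sublist ys)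
    (hlen : s.length = sharedCount xs ys) :
    s.Perm (sharedAux xs ys) := by
  have hsub : s.toFinset ⊆ xs.toFinset := by
    intro v hv; rw [List.mem_toFinset] at *; exact hx.subset hv
  have h1 : ∑ v ∈ s.toFinset, s.count v = ∑ v ∈ xs.toFinset, s.count v := by
    refine Finset.sum_subset hsub ?_
    intro v _ hv
    exact List.count_eq_zero.mpr (fun hc => hv (List.mem_toFinset.mpr hc))
  have hsum : ∑ v ∈ xs.toFinset, s.count v
      = ∑ v ∈ xs.toFinset, min (xs.count v) (ys.count v) := by
    rw [← h1, ← length_eq_sum_count_toFinset, hlen, sharedCount_eq_sum]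
  have hpt : ∀ v ∈ xs.toFinset, s.count v = min (xs.count v) (ys.count v) :=
    (Finset.sum_eq_sum_iff_of_le
      (fun v _ => le_min (hx.count_le v) (hy.count_le v))).mp hsum
  refine List.perm_iff_count.mpr (fun v => ?_)
  rw [count_sharedAux]
  by_cases hm : v ∈ xs
  · exact hpt v (List.mem_toFinset.mpr hm)
  · have h0 : xs.count v = 0 := List.count_eq_zero.mpr hm
    have hs0 : s.count v = 0 :=
      List.count_eq_zero.mpr (fun hc => hm (hx.subset hc))
    simp [h0, hs0]

-- ===== LCS recursion (proof-side reference) =====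
def lcsSuf : List Int → List Int → Nat
  | [], _ => 0
  | _ :: _, [] => 0
  | a :: as, b :: bs =>
      if a = b then lcsSuf as bs + 1
      else max (lcsSuf as (b :: bs)) (lcsSuf (a :: as) bs)
termination_by a b => a.length + b.length
decreasing_by all_goals (simp only [List.length_cons]; omega)

theorem lcsSuf_exists (a b : List Int) :
    ∃ s : List Int, s.Sublist a ∧ s.Sublist b ∧ s.length = lcsSuf a b := by
  fun_induction lcsSuf a b with
  | case1 b => exact ⟨[], List.nil_sublist _, List.nil_sublist _, rfl⟩
  | case2 a as => exact ⟨[], List.nil_sublist _, List.nil_sublist _, rfl⟩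
  | case3 as b bs ih =>
      obtain ⟨s, h1, h2, h3⟩ := ih
      exact ⟨b :: s, List.cons_sublist_cons.mpr h1, List.cons_sublist_cons.mpr h2,
        by simp [h3]⟩
  | case4 a as b bs h ihl ihr =>
      obtain ⟨s1, a1, b1, l1⟩ := ihl
      obtain ⟨s2, a2, b2, l2⟩ := ihr
      rcases le_total (lcsSuf (a :: as) bs) (lcsSuf as (b :: bs)) with hle | hle
      · exact ⟨s1, a1.cons a, b1, by omega⟩
      · exact ⟨s2, a2, b2.cons b, by omega⟩

theorem le_lcsSuf (a b : List Int) :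
    ∀ s : List Int, s.Sublist a → s.Sublist b → s.length ≤ lcsSuf a b := by
  fun_induction lcsSuf a b with
  | case1 b => intro s ha _; simp [List.sublist_nil.mp ha]
  | case2 a as => intro s _ hb; simp [List.sublist_nil.mp hb]
  | case3 as b bs ih =>
      rintro (_ | ⟨z, zs⟩) ha hb
      · simp
      · have hzs_a : zs.Sublist as := by
          rcases List.sublist_cons_iff.mp ha with h' | ⟨r, hr, hr'⟩
          · exact ((List.sublist_cons_self z zs).trans h')
          · injection hr with h1 h2; exact h2 ▸ hr'
        have hzs_b : zs.Sublist bs := by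
          rcases List.sublist_cons_iff.mp hb with h' | ⟨r, hr, hr'⟩
          · exact ((List.sublist_cons_self z zs).trans h')
          · injection hr with h1 h2; exact h2 ▸ hr'
        have := ih zs hzs_a hzs_b
        simp only [List.length_cons]; omega
  | case4 a as b bs h ihl ihr =>
      rintro (_ | ⟨z, zs⟩) ha hb
      · simp
      · by_cases hz : z = a
        · -- the head is a ≠ b, so the whole of s sits inside bs
          have hb' : (z :: zs).Sublist bs := by
            rcases List.sublist_cons_iff.mp hb with h' | ⟨r, hr, _⟩
            · exact h'
            · exact absurd hr (by simp [List.cons.injEq, hz, h])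
          exact le_trans (ihr _ ha hb') (le_max_right _ _)
        · have ha' : (z :: zs).Sublist as := by
            rcases List.sublist_cons_iff.mp ha with h' | ⟨r, hr, _⟩
            · exact h'
            · exact absurd hr (by simp [List.cons.injEq, hz])
          exact le_trans (ihl _ ha' hb) (le_max_left _ _)

-- ===== the row DP computes lcsSuf on the reversed lists =====
def rowOf (R : List Int) : List Int → List Int → List Nat
  | acc, [] => [lcsSuf R acc]
  | acc, y :: ys' => lcsSuf R acc :: rowOf R (y :: acc) ys'

theorem lcsSuf_nil_left (b : List Int) : lcsSuf [] b = 0 := by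
  cases b <;> simp [lcsSuf]

theorem lcsSuf_nil_right (x : Int) (R : List Int) : lcsSuf (x :: R) [] = 0 := by
  simp [lcsSuf]

theorem rowOf_nil_R (ys : List Int) : ∀ acc : List Int,
    rowOf [] acc ys = List.replicate (ys.length + 1) 0 := by
  induction ys with
  | nil => intro acc; simp [rowOf, lcsSuf_nil_left]
  | cons y ys ih =>
      intro acc
      simp [rowOf, lcsSuf_nil_left, ih, List.replicate_succ]

theorem step_rowOf (x : Int) (R : List Int) :
    ∀ (ys acc : List Int),
      lcsStepAux x ys (rowOf R acc ys) (lcsSuf (x :: R) acc)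
        = rowOf (x :: R) acc ys := by
  intro ys
  induction ys with
  | nil => intro acc; simp [rowOf, lcsStepAux]
  | cons y ys' ih =>
      intro acc
      have hnext : lcsSuf (x :: R) (y :: acc)
          = (if x = y then lcsSuf R acc + 1
             else max (lcsSuf R (y :: acc)) (lcsSuf (x :: R) acc)) := by
        simp only [lcsSuf]
      obtain ⟨t, ht⟩ : ∃ t, rowOf R (y :: acc) ys' = lcsSuf R (y :: acc) :: t := by
        cases ys' <;> exact ⟨_, rfl⟩
      simp only [rowOf, ht, lcsStepAux]
      rw [← hnext, ← ht, ih (y :: acc)]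

theorem getLast_rowOf (R : List Int) :
    ∀ (ys acc : List Int) (d : Nat),
      (rowOf R acc ys).getLastD d = lcsSuf R (ys.reverse ++ acc) := by
  intro ys
  induction ys with
  | nil => intro acc d; simp [rowOf]
  | cons y ys' ih =>
      intro acc d
      simp only [rowOf, List.getLastD_cons, ih (y :: acc)]
      simp [List.append_assoc]

theorem foldl_rows (ys : List Int) :
    ∀ (xs R : List Int),
      xs.foldl (fun prev x => lcsStepAux x ys prev 0) (rowOf R [] ys)
        = rowOf (xs.reverse ++ R) [] ys := by
  intro xs
  induction xs with
  | nil => intro R; simp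
  | cons x xs' ih =>
      intro R
      have hstep : lcsStepAux x ys (rowOf R [] ys) 0 = rowOf (x :: R) [] ys := by
        have h := step_rowOf x R ys []
        rwa [lcsSuf_nil_right] at h
      simp only [List.foldl_cons, hstep, ih (x :: R)]
      simp [List.append_assoc]

theorem dp_eq_lcsSuf (xs ys : List Int) :
    (xs.foldl (fun prev x => lcsStepAux x ys prev 0)
      (List.replicate (ys.length + 1) 0)).getLastD 0
      = lcsSuf xs.reverse ys.reverse := by
  rw [← rowOf_nil_R ys [], foldl_rows ys xs [], getLast_rowOf]
  simp

-- common-subsequence facts transported through reversal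
theorem lcs_rev_exists (xs ys : List Int) :
    ∃ s : List Int, s.Sublist xs ∧ s.Sublist ys ∧
      s.length = lcsSuf xs.reverse ys.reverse := by
  obtain ⟨s, h1, h2, h3⟩ := lcsSuf_exists xs.reverse ys.reverse
  refine ⟨s.reverse, ?_, ?_, by simpa using h3⟩
  · simpa using h1.reverse
  · simpa using h2.reverse

theorem le_lcs_rev {s xs ys : List Int} (hx : s.Sublist xs) (hy : s.Sublist ys) :
    s.length ≤ lcsSuf xs.reverse ys.reverse := by
  have h := le_lcsSuf xs.reverse ys.reverse s.reverse hx.reverse hy.reverse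
  simpa using h

-- A-side characterisation
theorem sharesA_iff (xs ys : List Int) :
    shares_order xs ys = true ↔
      (sharedAux xs ys ≠ [] ∧
        ∃ p : List Int, p.Perm (sharedAux xs ys) ∧ p.Sublist xs ∧ p.Sublist ys) := by
  unfold shares_order
  dsimp only
  by_cases hz : sharedAux xs ys = []
  · simp [hz]
  · rw [if_neg hz]
    simp only [ne_eq, hz, not_false_iff, true_and, List.any_eq_true]
    constructor
    · rintro ⟨p, hp, hcond⟩
      have hperm := perm_of_mem_permutations_full hp
      rw [Bool.and_eq_true, matchOrder_iff, matchOrder_iff] at hcond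
      by_cases h : xs.length < ys.length <;> simp only [if_pos, h] at hcond <;>
        exact ⟨p, hperm, by tauto, by tauto⟩
    · rintro ⟨p, hperm, hx, hy⟩
      refine ⟨p, mem_permutations_of_perm _ _ _ rfl hperm, ?_⟩
      rw [Bool.and_eq_true, matchOrder_iff, matchOrder_iff]
      by_cases h : xs.length < ys.length <;> simp [h, hx, hy]

-- B-side characterisation
theorem sharesB_iff (xs ys : List Int) :
    shares_order_alt xs ys = true ↔
      (sharedCount xs ys ≠ 0 ∧
        lcsSuf xs.reverse ys.reverse = sharedCount xs ys) := by
  unfold shares_order_alt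
  dsimp only
  by_cases hk : sharedCount xs ys = 0
  · simp [hk]
  · rw [if_neg hk]
    have hdp := dp_eq_lcsSuf xs ys
    rw [List.getLastD_eq_getLast?] at hdp
    simp [hdp, hk]

-- ===== VERDICT (by name: the statement is the Claim_ definition above) =====
theorem shares_order_spec : Claim_equal_shares_order := by
  unfold Claim_equal_shares_order
  intro xs ys _
  unfold Spec_shares_order
  by_cases hA : shares_order xs ys = true
  · obtain ⟨hz, p, hperm, hx, hy⟩ := (sharesA_iff xs ys).mp hA
    have hk : sharedCount xs ys ≠ 0 := by
      rw [← length_sharedAux]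
      simpa [List.length_eq_zero_iff] using hz
    have hplen : p.length = sharedCount xs ys := by
      rw [hperm.length_eq, length_sharedAux]
    have hge : sharedCount xs ys ≤ lcsSuf xs.reverse ys.reverse :=
      hplen ▸ le_lcs_rev hx hy
    have hle : lcsSuf xs.reverse ys.reverse ≤ sharedCount xs ys := by
      obtain ⟨s, h1, h2, h3⟩ := lcs_rev_exists xs ys
      rw [← h3]
      exact length_le_sharedCount h1 h2
    rw [hA, Eq.comm, sharesB_iff]
    exact ⟨hk, by omega⟩
  · rw [Bool.not_eq_true] at hA
    rw [hA, Eq.comm, Bool.eq_false_iff]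
    intro hB
    obtain ⟨hk, hlcs⟩ := (sharesB_iff xs ys).mp hB
    obtain ⟨s, h1, h2, h3⟩ := lcs_rev_exists xs ys
    have hsp : s.Perm (sharedAux xs ys) :=
      perm_shared_of_length_eq h1 h2 (by omega)
    have hAt : shares_order xs ys = true := by
      rw [sharesA_iff]
      refine ⟨?_, s, hsp, h1, h2⟩
      intro h0
      rw [← length_sharedAux] at hk
      simp [h0] at hk
    simp [hAt] at hA
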